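-- pv_equiv track=rewrite | github.com/aleattene/python-workbook | Chap_05/130_UnaryBinaryOperators.py | tokenizingString
-- ===== SOURCE A (Python) =====
-- def tokenizingString(string):
--     # LIST of the MATHEMATICAL OPERATORS
--     tokens = ["+", "-", "*", "/", "^", "(", ")"]
--     tokens_list = []
--     i = 0
--     while i < len(string):
--         # Check MATHEMATICAL OPERATORS
--         if string[i] in tokens:
--             tokens_list.append(string[i])
--         # Check INTEGERS
--         elif string[i].isdigit():
--             tmp = ""
--             # LOOP for NUMBERS > 1 DIGITS
--             while i < len(string):
--                 if string[i].isdigit():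
--                     tmp += string[i]
--                     i += 1
--                 else:
--                     i -= 1
--                     break
--             tokens_list.append(tmp)
--         i += 1
--     return tokens_list      # RETURN LIST of TOKENS
-- ===== SOURCE B (Python) =====
-- def tokenizingString(string):
--     # Single pass with a pending-number accumulator flushed at run boundaries.
--     OPS = "+-*/^()"
--     tokens_list = []
--     num = ""
--     for c in string:
--         if c.isdigit():
--             num += c
--         else:
--             if num:
--                 tokens_list.append(num)
--                 num = ""
--             if c in OPS:
--                 tokens_list.append(c)
--     if num:
--         tokens_list.append(num)
--     return tokens_list
-- ===== Notes on version B (the rewrite author's own statement) =====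
-- stated objective: simpler
-- what changed: A's index-juggling while loop (inner digit-collecting loop with an i -= 1 backtrack, then re-dispatch on the same index) is replaced by a single for-loop over the characters carrying a pending-number accumulator that is flushed at digit-run boundaries and at end of string.
import Mathlib
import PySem

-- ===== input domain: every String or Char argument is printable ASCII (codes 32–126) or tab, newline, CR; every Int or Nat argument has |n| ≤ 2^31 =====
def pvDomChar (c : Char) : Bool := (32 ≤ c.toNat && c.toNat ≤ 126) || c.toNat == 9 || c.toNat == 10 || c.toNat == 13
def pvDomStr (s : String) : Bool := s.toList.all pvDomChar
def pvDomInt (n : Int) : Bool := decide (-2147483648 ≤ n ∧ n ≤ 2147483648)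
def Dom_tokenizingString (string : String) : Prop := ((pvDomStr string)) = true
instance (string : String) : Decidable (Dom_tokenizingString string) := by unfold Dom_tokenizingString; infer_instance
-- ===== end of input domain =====

-- B replaces A's index-juggling while loop (with its inner digit loop and i -= 1 backtrack)
-- by a single fold carrying a pending-number accumulator flushed at run boundaries (objective: simpler).

-- ===== PORT A =====
-- the list 'tokens' of mathematical operators
def pvTokensA : List Char := ['+', '-', '*', '/', '^', '(', ')']

-- inner 'while i < len(string)' loop: builds tmp, returns (tmp, i) as left by the loop
-- (fuel only makes the recursion structural; it is always sufficient)
def pvAInner (s : List Char) (i : Int) (tmp : List Char) (fuel : Nat) : List Char × Int :=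
  match fuel with
  | 0 => (tmp, i)
  | fuel + 1 =>
    if i < (s.length : Int) then
      let c := PySem.List.pyGetD s i ' '
      if PySem.Chars.isdigit c then pvAInner s (i + 1) (tmp ++ [c]) fuel
      else (tmp, i - 1)   -- i -= 1; break
    else (tmp, i)

-- outer 'while i < len(string)' loop
def pvAOuter (s : List Char) (i : Int) (tokens_list : List String) (fuel : Nat) : List String :=
  match fuel with
  | 0 => tokens_list
  | fuel + 1 =>
    if i < (s.length : Int) then
      let c := PySem.List.pyGetD s i ' '
      if c ∈ pvTokensA then
        pvAOuter s (i + 1) (tokens_list ++ [String.ofList [c]]) fuel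
      else if PySem.Chars.isdigit c then
        let p := pvAInner s i [] (s.length + 1)
        pvAOuter s (p.2 + 1) (tokens_list ++ [String.ofList p.1]) fuel
      else
        pvAOuter s (i + 1) tokens_list fuel
    else tokens_list

def tokenizingString (string : String) : List String :=
  pvAOuter string.toList 0 [] (string.toList.length + 1)

-- ===== PORT B =====
-- the characters of B's OPS string "+-*/^()"
def pvOpsB : List Char := ['+', '-', '*', '/', '^', '(', ')']

-- one step of B's for-loop: state = (tokens_list, num)
def pvBStep (st : List String × List Char) (c : Char) : List String × List Char :=
  if PySem.Chars.isdigit c then (st.1, st.2 ++ [c])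
  else
    let out := if st.2 ≠ [] then st.1 ++ [String.ofList st.2] else st.1
    if c ∈ pvOpsB then (out ++ [String.ofList [c]], []) else (out, [])

def tokenizingString_alt (string : String) : List String :=
  let p := string.toList.foldl pvBStep ([], [])
  if p.2 ≠ [] then p.1 ++ [String.ofList p.2] else p.1

-- ===== PRECONDITION & SPEC =====
def Spec_tokenizingString (string : String) (out : List String) : Prop := out = tokenizingString_alt string
instance (string : String) (out : List String) : Decidable (Spec_tokenizingString string out) := by unfold Spec_tokenizingString; infer_instance

-- ===== CLAIM (what is proved, stated in full; the proofs are below) =====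
def Claim_equal_tokenizingString : Prop := ∀ (string : String), Dom_tokenizingString string → Spec_tokenizingString string (tokenizingString string)

-- ===== LEMMAS AND PROOFS =====

-- final flush of B's state
def pvBFin (p : List String × List Char) : List String :=
  if p.2 ≠ [] then p.1 ++ [String.ofList p.2] else p.1

lemma pvOps_eq : pvOpsB = pvTokensA := rfl

lemma pvOps_not_digit : ∀ c ∈ pvTokensA, PySem.Chars.isdigit c = false := by
  intro c hc; fin_cases hc <;> decide

lemma dropWhile_head_false {p : Char → Bool} : ∀ (l : List Char) (x : Char) (xs : List Char),
    l.dropWhile p = x :: xs → p x = false := by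
  intro l
  induction l with
  | nil => intro x xs h; simp [List.dropWhile] at h
  | cons a t ih =>
    intro x xs h
    by_cases hp : p a
    · rw [List.dropWhile_cons_of_pos hp] at h; exact ih x xs h
    · rw [List.dropWhile_cons_of_neg hp] at h
      cases h; simpa using hp

-- B over a block of digits just accumulates them into num
lemma pvB_digits : ∀ (run rest : List Char) (acc : List String) (num : List Char),
    (∀ c ∈ run, PySem.Chars.isdigit c = true) →
    (run ++ rest).foldl pvBStep (acc, num) = rest.foldl pvBStep (acc, num ++ run) := by
  intro run
  induction run with
  | nil => intro rest acc num _; simp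
  | cons c t ih =>
    intro rest acc num h
    have hc : PySem.Chars.isdigit c = true := h c (by simp)
    simp only [List.cons_append, List.foldl_cons, pvBStep, hc, if_true]
    rw [ih rest acc (num ++ [c]) (fun d hd => h d (by simp [hd]))]
    simp

-- flushing num before a non-digit character changes nothing
lemma pvB_flush_step (acc : List String) (num : List Char) (c : Char)
    (hc : PySem.Chars.isdigit c = false) (hnum : num ≠ []) :
    pvBStep (acc, num) c = pvBStep (acc ++ [String.ofList num], []) c := by
  simp [pvBStep, hc, hnum]

-- characterisation of A's inner while loop
lemma pvAInner_eq (s : List Char) : ∀ (fuel : Nat) (n : Nat) (tmp : List Char),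
    s.length - n < fuel → n ≤ s.length →
    pvAInner s (n : Int) tmp fuel =
      (tmp ++ (s.drop n).takeWhile PySem.Chars.isdigit,
       if n + ((s.drop n).takeWhile PySem.Chars.isdigit).length = s.length
       then (s.length : Int)
       else ((n + ((s.drop n).takeWhile PySem.Chars.isdigit).length : Nat) : Int) - 1) := by
  intro fuel
  induction fuel with
  | zero => intro n tmp h _; omega
  | succ fuel ih =>
    intro n tmp h hle
    rcases Nat.lt_or_ge n s.length with hn | hn
    · have hget : PySem.List.pyGetD s (n : Int) ' ' = s[n] := by
        rw [PySem.List.pyGetD_natCast]; exact List.getD_eq_getElem s ' ' hn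
      have hdrop : s.drop n = s[n] :: s.drop (n + 1) := List.drop_eq_getElem_cons hn
      by_cases hd : PySem.Chars.isdigit s[n]
      · have : pvAInner s (n : Int) tmp (fuel + 1) = pvAInner s ((n : Int) + 1) (tmp ++ [s[n]]) fuel := by
          simp [pvAInner, hn, hget, hd]
        rw [this]
        have : ((n : Int) + 1) = ((n + 1 : Nat) : Int) := by push_cast; ring
        rw [this, ih (n + 1) (tmp ++ [s[n]]) (by omega) (by omega)]
        rw [hdrop, List.takeWhile_cons_of_pos hd]
        simp only [List.length_cons]
        have harith : n + (((s.drop (n+1)).takeWhile PySem.Chars.isdigit).length + 1)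
            = n + 1 + ((s.drop (n+1)).takeWhile PySem.Chars.isdigit).length := by omega
        rw [harith]
        simp [List.append_assoc]
      · have : pvAInner s (n : Int) tmp (fuel + 1) = (tmp, (n : Int) - 1) := by
          simp [pvAInner, hn, hget, hd]
        rw [this, hdrop, List.takeWhile_cons_of_neg hd]
        simp only [List.length_nil, Nat.add_zero]
        have hne : ¬ (n = s.length) := by omega
        simp [hne]
    · have hn' : n = s.length := by omega
      subst hn'
      simp [pvAInner]

-- main invariant: A's outer loop at index n equals B's fold over the remaining suffix
lemma pvMain (s : List Char) : ∀ (fuel : Nat) (n : Nat) (acc : List String),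
    s.length - n < fuel →
    pvAOuter s (n : Int) acc fuel = pvBFin ((s.drop n).foldl pvBStep (acc, [])) := by
  intro fuel
  induction fuel with
  | zero => intro n acc h; omega
  | succ fuel ih =>
    intro n acc h
    rcases Nat.lt_or_ge n s.length with hn | hn
    · have hget : PySem.List.pyGetD s (n : Int) ' ' = s[n] := by
        rw [PySem.List.pyGetD_natCast]; exact List.getD_eq_getElem s ' ' hn
      have hdrop : s.drop n = s[n] :: s.drop (n + 1) := List.drop_eq_getElem_cons hn
      have hcast : ((n : Int) + 1) = ((n + 1 : Nat) : Int) := by push_cast; ring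
      by_cases hop : s[n] ∈ pvTokensA
      · have hd : PySem.Chars.isdigit s[n] = false := pvOps_not_digit _ hop
        have hstep : pvBStep (acc, []) s[n] = (acc ++ [String.ofList [s[n]]], []) := by
          simp [pvBStep, hd, pvOps_eq, hop]
        rw [show pvAOuter s (n : Int) acc (fuel + 1)
              = pvAOuter s ((n : Int) + 1) (acc ++ [String.ofList [s[n]]]) fuel by
            simp [pvAOuter, hn, hget, hop]]
        rw [hcast, ih (n + 1) _ (by omega), hdrop, List.foldl_cons, hstep]
      · by_cases hd : PySem.Chars.isdigit s[n]
        · -- digit run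
          set run := (s.drop n).takeWhile PySem.Chars.isdigit with hrun
          set k := run.length with hk
          have hinner := pvAInner_eq s (s.length + 1) n [] (by omega) (by omega)
          have hrunne : run ≠ [] := by
            rw [hrun, hdrop, List.takeWhile_cons_of_pos hd]; simp
          have hrundig : ∀ c ∈ run, PySem.Chars.isdigit c = true := by
            intro c hc; exact List.mem_takeWhile_imp hc
          have hsplit : s.drop n = run ++ (s.drop n).dropWhile PySem.Chars.isdigit :=
            (List.takeWhile_append_dropWhile).symm
          have hk1 : 1 ≤ k := by
            rw [hk]; exact List.length_pos_iff.mpr hrunne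
          have hlen := congrArg List.length hsplit
          simp only [List.length_drop, List.length_append] at hlen
          have hkle : n + k ≤ s.length := by omega
          have hrest : s.drop (n + k) = (s.drop n).dropWhile PySem.Chars.isdigit := by
            have hdd : (s.drop n).drop k = s.drop (n + k) := by
              rw [List.drop_drop, Nat.add_comm]
            rw [← hdd]
            conv_lhs => rw [hsplit]
            rw [hk, List.drop_left]
          have hstart : pvAOuter s (n : Int) acc (fuel + 1)
              = pvAOuter s ((pvAInner s (n : Int) [] (s.length + 1)).2 + 1)
                  (acc ++ [String.ofList (pvAInner s (n : Int) [] (s.length + 1)).1]) fuel := by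
            simp [pvAOuter, hn, hget, hop, hd]
          rw [hstart, hinner]
          simp only [List.nil_append]
          rw [show (s.drop n).takeWhile PySem.Chars.isdigit = run from hrun.symm] at *
          by_cases hend : n + k = s.length
          · -- the run reaches the end of the string
            have hrest0 : (s.drop n).dropWhile PySem.Chars.isdigit = [] := by
              have h0 : s.drop (n + k) = ([] : List Char) := by
                apply List.drop_eq_nil_of_le; omega
              rw [← hrest, h0]
            rw [← hk, if_pos hend]
            rw [show ((s.length : Int) + 1) = ((s.length + 1 : Nat) : Int) by push_cast; ring,
               ih (s.length + 1) _ (by omega)]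
            rw [show s.drop (s.length + 1) = ([] : List Char) from
                 List.drop_eq_nil_of_le (by omega)]
            rw [hsplit, hrest0, pvB_digits run [] acc [] hrundig]
            simp [pvBFin, hrunne]
          · rw [← hk, if_neg hend]
            rw [show (((n + k : Nat) : Int) - 1 + 1) = ((n + k : Nat) : Int) by ring,
               ih (n + k) _ (by omega)]
            rw [hsplit, pvB_digits run _ acc [] hrundig]
            obtain ⟨x, xs, hx⟩ : ∃ x xs, (s.drop n).dropWhile PySem.Chars.isdigit = x :: xs := by
              rcases hrest' : (s.drop n).dropWhile PySem.Chars.isdigit with _ | ⟨x, xs⟩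
              · exfalso
                have : s.drop (n + k) = [] := by rw [hrest, hrest']
                have := congrArg List.length this
                simp at this
                omega
              · exact ⟨x, xs, rfl⟩
            have hxnd : PySem.Chars.isdigit x = false :=
              dropWhile_head_false _ x xs hx
            rw [hrest, hx, List.foldl_cons, List.foldl_cons, List.nil_append,
                pvB_flush_step acc run x hxnd hrunne]
        · -- neither operator nor digit: skipped by both
          have hstep : pvBStep (acc, []) s[n] = (acc, []) := by
            simp [pvBStep, hd, pvOps_eq, hop]
          rw [show pvAOuter s (n : Int) acc (fuel + 1) = pvAOuter s ((n : Int) + 1) acc fuel by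
              simp [pvAOuter, hn, hget, hop, hd]]
          rw [hcast, ih (n + 1) _ (by omega), hdrop, List.foldl_cons, hstep]
    · have hnot : ¬ ((n : Int) < (s.length : Int)) := by omega
      rw [List.drop_eq_nil_of_le hn]
      simp [pvAOuter, hnot, pvBFin]

-- ===== VERDICT (by name: the statement is the Claim_ definition above) =====
theorem tokenizingString_spec : Claim_equal_tokenizingString := by
  intro s _
  unfold Spec_tokenizingString tokenizingString tokenizingString_alt
  have := pvMain s.toList (s.toList.length + 1) 0 [] (by omega)
  simpa [pvBFin] using this
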